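-- pv_equiv track=rewrite | github.com/Wapiti08/GraphSec-Flow | src/temp_localize.py | _get_version_sequence
-- ===== SOURCE A (Python) =====
-- def _get_version_sequence(versions_info, start_ver, end_ver):
--     """Get sequence of versions between start and end"""
--     sequence = []
--     in_range = False
--
--     for v_info in versions_info:
--         ver = v_info['version']
--
--         if ver == start_ver:
--             in_range = True
--
--         if in_range:
--             sequence.append(ver)
--
--         if ver == end_ver:
--             break
--
--     return sequence
-- ===== SOURCE B (Python) =====
-- def _get_version_sequence(versions_info, start_ver, end_ver):
--     versions = []
--     for v_info in versions_info:
--         ver = v_info['version']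
--         versions.append(ver)
--         if ver == end_ver:
--             break
--     if start_ver in versions:
--         return versions[versions.index(start_ver):]
--     return []
-- ===== Notes on version B (the rewrite author's own statement) =====
-- stated objective: simpler
-- what changed: A's stateful pass with an in_range flag and conditional append is replaced by collecting the version strings up to and including the first end_ver, then slicing from the first start_ver with index; the flag disappears.
import Mathlib
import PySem

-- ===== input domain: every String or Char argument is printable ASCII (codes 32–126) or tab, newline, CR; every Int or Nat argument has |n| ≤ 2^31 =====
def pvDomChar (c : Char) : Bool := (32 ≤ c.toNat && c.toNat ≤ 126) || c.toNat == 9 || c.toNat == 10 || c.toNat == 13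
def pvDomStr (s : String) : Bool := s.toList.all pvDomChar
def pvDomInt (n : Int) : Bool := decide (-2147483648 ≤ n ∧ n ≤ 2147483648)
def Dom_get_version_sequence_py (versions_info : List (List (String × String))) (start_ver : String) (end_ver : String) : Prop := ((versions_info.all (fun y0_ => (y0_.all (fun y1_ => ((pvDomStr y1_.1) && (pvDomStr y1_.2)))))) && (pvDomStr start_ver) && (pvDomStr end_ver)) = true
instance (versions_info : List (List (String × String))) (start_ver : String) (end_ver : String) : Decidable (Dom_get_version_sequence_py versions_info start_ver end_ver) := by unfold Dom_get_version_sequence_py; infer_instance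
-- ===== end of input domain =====

-- B replaces A's in_range-flag pass by collect-versions-up-to-end then index-and-slice (simpler decomposition; same O(n) cost; B raises exactly where A raises).


-- v_info['version'] : first-match dict lookup; '.getD ""' only totalises — Pre_ guarantees every dict either
-- program actually reads has the key (both Pythons raise KeyError at the first one that lacks it)
def pvVer (d : List (String × String)) : String := ((PySem.Dict.mk d).get? "version").getD ""

-- ===== PORT A =====
-- the for-loop with `sequence`, `in_range` and `break`, step for step
def pvGoA : List (List (String × String)) → String → String → Bool → List String
  | [], _, _, _ => []
  | d :: rest, start_ver, end_ver, in_range =>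
    let ver := pvVer d
    let in_range' := in_range || (ver == start_ver)
    let here := if in_range' then [ver] else []
    if ver == end_ver then here else here ++ pvGoA rest start_ver end_ver in_range'

def get_version_sequence_py (versions_info : List (List (String × String))) (start_ver : String) (end_ver : String) : List String :=
  pvGoA versions_info start_ver end_ver false

-- ===== PORT B =====
-- B's first loop: append each version, break after the first one equal to end_ver
def pvCollect : List (List (String × String)) → String → List String
  | [], _ => []
  | d :: rest, end_ver =>
    let ver := pvVer d
    ver :: (if ver == end_ver then [] else pvCollect rest end_ver)

def get_version_sequence_py_alt (versions_info : List (List (String × String))) (start_ver : String) (end_ver : String) : List String :=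
  let versions := pvCollect versions_info end_ver
  match PySem.List.index? versions start_ver with   -- `start_ver in versions` + `.index`
  | some i => PySem.List.slice versions (some (i : Int)) none
  | none => []

-- ===== PRECONDITION & SPEC =====
-- Pre_ excludes exactly the inputs on which both Pythons raise KeyError: a dict lacking the 'version'
-- key that lies at or before the break point (i.e. before the first dict whose version equals end_ver).
def Pre_get_version_sequence_py (versions_info : List (List (String × String))) (start_ver : String) (end_ver : String) : Prop :=
  ∀ d ∈ versions_info.takeWhile (fun d => ((PySem.Dict.mk d).get? "version") ≠ some end_ver),
    ((PySem.Dict.mk d).get? "version").isSome = true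
instance (versions_info : List (List (String × String))) (start_ver : String) (end_ver : String) : Decidable (Pre_get_version_sequence_py versions_info start_ver end_ver) := by unfold Pre_get_version_sequence_py; infer_instance

def pvWitness_get_version_sequence_py : (List (List (String × String))) × String × String :=
  ([[("version", "1.0")], [("version", "1.1")]], "1.0", "1.1")

def Spec_get_version_sequence_py (versions_info : List (List (String × String))) (start_ver : String) (end_ver : String) (out : List String) : Prop := out = get_version_sequence_py_alt versions_info start_ver end_ver
instance (versions_info : List (List (String × String))) (start_ver : String) (end_ver : String) (out : List String) : Decidable (Spec_get_version_sequence_py versions_info start_ver end_ver out) := by unfold Spec_get_version_sequence_py; infer_instance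

-- ===== CLAIM (what is proved, stated in full; the proofs are below) =====
def Claim_equal_get_version_sequence_py : Prop := ∀ (versions_info : List (List (String × String))) (start_ver : String) (end_ver : String), Dom_get_version_sequence_py versions_info start_ver end_ver → Pre_get_version_sequence_py versions_info start_ver end_ver → Spec_get_version_sequence_py versions_info start_ver end_ver (get_version_sequence_py versions_info start_ver end_ver)

-- ===== LEMMAS AND PROOFS =====

-- reference shape of B's second half, used only in the proofs
def pvDropUntil : List String → String → List String
  | [], _ => []
  | v :: r, s => if v == s then v :: r else pvDropUntil r s

theorem pvDropUntil_of_not_mem {vs : List String} {s : String} (h : s ∉ vs) : pvDropUntil vs s = [] := by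
  induction vs with
  | nil => rfl
  | cons v r ih =>
    simp only [List.mem_cons, not_or] at h
    have hb : (v == s) = false := beq_eq_false_iff_ne.mpr (fun hh => h.1 hh.symm)
    simp [pvDropUntil, hb, ih h.2]

theorem pvDropUntil_append {pre suf : List String} {s : String} (h : s ∉ pre) :
    pvDropUntil (pre ++ s :: suf) s = s :: suf := by
  induction pre with
  | nil => simp [pvDropUntil]
  | cons v r ih =>
    simp only [List.mem_cons, not_or] at h
    have hb : (v == s) = false := beq_eq_false_iff_ne.mpr (fun hh => h.1 hh.symm)
    simp [pvDropUntil, hb, ih h.2]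

theorem pvDropUntil_of_index? (vs : List String) (s : String) :
    (match PySem.List.index? vs s with
     | some i => PySem.List.slice vs (some (i : Int)) none
     | none => []) = pvDropUntil vs s := by
  rcases h : PySem.List.index? vs s with _ | i
  · exact (pvDropUntil_of_not_mem ((PySem.List.index?_eq_none_iff vs s).mp h)).symm
  · obtain ⟨pre, suf, hvs, hlen, hpre⟩ := (PySem.List.index?_eq_some_iff vs s i).mp h
    simp only
    rw [PySem.List.slice_from_natCast, hvs, pvDropUntil_append hpre, ← hlen, List.drop_left]

theorem pvGoA_true (vi : List (List (String × String))) (s e : String) :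
    pvGoA vi s e true = pvCollect vi e := by
  induction vi with
  | nil => rfl
  | cons d r ih =>
    by_cases hv : pvVer d = e <;> simp [pvGoA, pvCollect, hv, ih]

theorem pvGoA_false (vi : List (List (String × String))) (s e : String) :
    pvGoA vi s e false = pvDropUntil (pvCollect vi e) s := by
  induction vi with
  | nil => rfl
  | cons d r ih =>
    by_cases he : pvVer d = e
    · by_cases hs : pvVer d = s <;> simp [pvGoA, pvCollect, pvDropUntil, he, hs]
    · by_cases hs : pvVer d = s
      · subst hs
        simp [pvGoA, pvCollect, pvDropUntil, he, pvGoA_true]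
      · have hbs : (pvVer d == s) = false := beq_eq_false_iff_ne.mpr hs
        simp [pvGoA, pvCollect, pvDropUntil, he, hbs, ih]

-- ===== VERDICT (by name: the statement is the Claim_ definition above) =====
theorem get_version_sequence_py_spec : Claim_equal_get_version_sequence_py := by
  intro vi s e _ _
  unfold Spec_get_version_sequence_py get_version_sequence_py get_version_sequence_py_alt
  rw [pvDropUntil_of_index?, pvGoA_false]
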